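-- pv_equiv track=rewrite | github.com/CompSci2013/ngx-prime | tools/companion-to-pdf.py | extract_title_from_content
-- ===== SOURCE A (Python) =====
-- def extract_title_from_content(content: str) -> tuple[str, str]:
--     """Extract title and subtitle from markdown content."""
--     lines = content.split('\n')
--     title = "Document"
--     subtitle = ""
--
--     for line in lines[:20]:  # Check first 20 lines
--         if line.startswith('# '):
--             title = line[2:].strip()
--             break
--
--     # Look for subtitle pattern (document type, audience, etc.)
--     for line in lines[:30]:
--         if line.startswith('**Document Type:**') or line.startswith('**Audience:**'):
--             subtitle = line.replace('**', '').strip()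
--             break
--
--     return title, subtitle
-- ===== SOURCE B (Python) =====
-- def extract_title_from_content(content: str) -> tuple[str, str]:
--     """Extract title and subtitle from markdown content (single fused scan)."""
--     title, subtitle = "Document", ""
--     title_found = subtitle_found = False
--     for i, line in enumerate(content.split('\n')[:30]):
--         if title_found and subtitle_found:
--             break
--         if not title_found and i < 20 and line.startswith('# '):
--             title = line[2:].strip()
--             title_found = True
--         if not subtitle_found and (line.startswith('**Document Type:**')
--                                    or line.startswith('**Audience:**')):
--             subtitle = line.replace('**', '').strip()
--             subtitle_found = True
--     return title, subtitle
-- ===== Notes on version B (the rewrite author's own statement) =====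
-- stated objective: alternative
-- what changed: Replaces A's two separate sequential scans (first 20 lines for the title, first 30 for the subtitle) by one fused indexed loop over the first 30 lines that maintains found-flags for both fields and stops as soon as both are found.
import Mathlib
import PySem

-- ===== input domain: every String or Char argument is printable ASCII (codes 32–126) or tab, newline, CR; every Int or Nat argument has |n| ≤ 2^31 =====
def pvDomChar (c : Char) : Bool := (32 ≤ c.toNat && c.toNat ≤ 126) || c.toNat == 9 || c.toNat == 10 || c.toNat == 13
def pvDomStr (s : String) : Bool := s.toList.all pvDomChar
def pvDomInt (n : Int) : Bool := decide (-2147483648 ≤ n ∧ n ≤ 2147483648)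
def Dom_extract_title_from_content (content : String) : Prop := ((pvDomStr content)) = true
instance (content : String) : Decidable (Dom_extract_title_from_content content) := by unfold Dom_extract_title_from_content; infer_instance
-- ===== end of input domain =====

-- B fuses A's two separate sequential scans into one indexed loop with found-flags; alternative decomposition, same cost.


-- ===== PORT A =====
-- first loop of A: first line starting with '# ' in the given list sets the title and breaks
def pvA_titleLoop : List String → String → String
  | [], title => title
  | l :: ls, title =>
    if PySem.Str.startswith l "# " then PySem.Str.strip (PySem.Str.slice l (some 2) none)
    else pvA_titleLoop ls title

-- second loop of A: first marker line sets the subtitle and breaks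
def pvA_subLoop : List String → String → String
  | [], subtitle => subtitle
  | l :: ls, subtitle =>
    if PySem.Str.startswith l "**Document Type:**" || PySem.Str.startswith l "**Audience:**" then
      PySem.Str.strip (PySem.Str.replace l "**" "")
    else pvA_subLoop ls subtitle

def extract_title_from_content (content : String) : String × String :=
  let lines := (PySem.Str.split? content "\n").getD []
  let title := pvA_titleLoop (PySem.List.slice lines none (some 20)) "Document"
  let subtitle := pvA_subLoop (PySem.List.slice lines none (some 30)) ""
  (title, subtitle)

-- ===== PORT B =====
-- fused loop of B: index i, found-flags, early break once both are found
def pvB_loop : Nat → List String → Bool → Bool → String → String → String × String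
  | _, [], _, _, t, s => (t, s)
  | i, l :: ls, tf, sf, t, s =>
    if tf && sf then (t, s)
    else
      let p := if !tf && decide (i < 20) && PySem.Str.startswith l "# " then
                 (true, PySem.Str.strip (PySem.Str.slice l (some 2) none))
               else (tf, t)
      let q := if !sf && (PySem.Str.startswith l "**Document Type:**" || PySem.Str.startswith l "**Audience:**") then
                 (true, PySem.Str.strip (PySem.Str.replace l "**" ""))
               else (sf, s)
      pvB_loop (i + 1) ls p.1 q.1 p.2 q.2

def extract_title_from_content_alt (content : String) : String × String :=
  pvB_loop 0 (PySem.List.slice ((PySem.Str.split? content "\n").getD []) none (some 30)) false false "Document" ""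

-- ===== PRECONDITION & SPEC =====
def Spec_extract_title_from_content (content : String) (out : String × String) : Prop := out = extract_title_from_content_alt content
instance (content : String) (out : String × String) : Decidable (Spec_extract_title_from_content content out) := by unfold Spec_extract_title_from_content; infer_instance

-- ===== CLAIM (what is proved, stated in full; the proofs are below) =====
def Claim_equal_extract_title_from_content : Prop := ∀ (content : String), Dom_extract_title_from_content content → Spec_extract_title_from_content content (extract_title_from_content content)

-- ===== LEMMAS AND PROOFS =====
theorem pvB_loop_eq (ls : List String) : ∀ (i : Nat) (tf sf : Bool) (t s : String),
    pvB_loop i ls tf sf t s =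
      ((if tf then t else pvA_titleLoop (ls.take (20 - i)) t),
       (if sf then s else pvA_subLoop ls s)) := by
  induction ls with
  | nil =>
    intro i tf sf t s
    simp [pvB_loop, pvA_titleLoop, pvA_subLoop]
  | cons l ls ih =>
    intro i tf sf t s
    rcases Nat.lt_or_ge i 20 with hi | hi
    · have h1 : 20 - i = (20 - (i + 1)) + 1 := by omega
      by_cases hT : PySem.Str.startswith l "# " = true <;>
        by_cases hS : (PySem.Str.startswith l "**Document Type:**" || PySem.Str.startswith l "**Audience:**") = true <;>
          cases tf <;> cases sf <;>
            simp [pvB_loop, ih, pvA_titleLoop, pvA_subLoop, hT, hS, hi, h1, -PySem.Str.startswith_eq]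
    · have h0 : 20 - i = 0 := by omega
      have h0' : 20 - (i + 1) = 0 := by omega
      have hni : ¬ i < 20 := by omega
      by_cases hT : PySem.Str.startswith l "# " = true <;>
        by_cases hS : (PySem.Str.startswith l "**Document Type:**" || PySem.Str.startswith l "**Audience:**") = true <;>
          cases tf <;> cases sf <;>
            simp [pvB_loop, ih, pvA_titleLoop, pvA_subLoop, hT, hS, hni, h0, h0', -PySem.Str.startswith_eq]

-- ===== VERDICT (by name: the statement is the Claim_ definition above) =====
theorem extract_title_from_content_spec : Claim_equal_extract_title_from_content := by
  intro content _
  unfold Spec_extract_title_from_content extract_title_from_content extract_title_from_content_alt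
  show (pvA_titleLoop (PySem.List.slice ((PySem.Str.split? content "\n").getD []) none (some 20)) "Document",
        pvA_subLoop (PySem.List.slice ((PySem.Str.split? content "\n").getD []) none (some 30)) "") = _
  rw [PySem.List.slice_to _ (by norm_num : (0:Int) ≤ 20),
      PySem.List.slice_to _ (by norm_num : (0:Int) ≤ 30),
      pvB_loop_eq]
  simp [List.take_take]
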